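-- pv_equiv track=rewrite | github.com/Schromeo/CodingStepByStep | OAPrepare/CS/reverse_k_str.py | solution
-- ===== SOURCE A (Python) =====
-- def solution(word):
--     mn = word  # 初始化最小字符串为原始字符串
--     n = len(word)
--     for k in range(1, n + 1):
--         # 反转前 k 个字符
--         front_reversed = word[:k][::-1] + word[k:]
--         mn = min(mn, front_reversed)
--
--         # 反转后 k 个字符
--         back_reversed = word[:-k] + word[-k:][::-1]
--         mn = min(mn, back_reversed)
--     return mn
-- ===== SOURCE B (Python) =====
-- def solution(word):
--     n = len(word)
--     R = ''.join(reversed(word))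
--     best = word
--     rp = ""                               # reversed prefix, built incrementally
--     i = 0
--     for c in word:
--         rp = c + rp                       # reverse of first i+1 chars
--         f = rp + word[i+1:]
--         if f < best:
--             best = f
--         b = word[:n-1-i] + R[:i+1]        # reverse last i+1 chars, via precomputed R
--         if b < best:
--             best = b
--         i += 1
--     return best
-- ===== Notes on version B (the rewrite author's own statement) =====
-- stated objective: faster
-- what changed: B makes one pass that extends the reversed prefix incrementally (one cons per step) and reads each suffix reversal off a single precomputed reversed copy, instead of A's per-iteration slice-and-reverse of both ends with negative indices and min().
import Mathlib
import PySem

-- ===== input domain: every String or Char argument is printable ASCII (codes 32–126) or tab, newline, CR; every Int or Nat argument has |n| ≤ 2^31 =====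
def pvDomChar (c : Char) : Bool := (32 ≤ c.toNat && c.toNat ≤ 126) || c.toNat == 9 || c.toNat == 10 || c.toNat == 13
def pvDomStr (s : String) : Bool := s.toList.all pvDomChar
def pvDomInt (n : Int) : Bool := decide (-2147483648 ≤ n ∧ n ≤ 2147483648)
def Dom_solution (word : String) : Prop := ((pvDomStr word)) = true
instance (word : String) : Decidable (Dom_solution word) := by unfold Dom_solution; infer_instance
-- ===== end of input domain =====

-- B replaces A's per-iteration slice-and-reverse of both ends by one pass with an incrementally
-- built reversed prefix and one precomputed reversed copy (objective: faster, constant factor).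

-- ===== PORT A =====
-- loop body of A: front_reversed / back_reversed candidates, running min
-- (word[:k][::-1] is slice? … (-1); it never raises, so .getD [] is exact)
def stepA (cs : List Char) (mn : List Char) (k : Int) : List Char :=
  let front := ((PySem.List.slice? (PySem.List.slice cs none (some k)) none none (-1)).getD [])
                 ++ PySem.List.slice cs (some k) none
  let mn := if PySem.Chars.strLt front mn then front else mn
  let back := PySem.List.slice cs none (some (-k))
                ++ ((PySem.List.slice? (PySem.List.slice cs (some (-k)) none) none none (-1)).getD [])
  if PySem.Chars.strLt back mn then back else mn

def solution (word : String) : String :=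
  let cs := word.toList
  let n : Int := cs.length
  String.ofList ((PySem.List.pyRange 1 (n + 1)).foldl (stepA cs) cs)

-- ===== PORT B =====
-- loop body of B: state (best, rp, i); rp = reversed prefix so far, i = position counter
def stepB (cs R : List Char) (n : Int) (st : List Char × List Char × Int) (c : Char) :
    List Char × List Char × Int :=
  let rp := c :: st.2.1
  let f := rp ++ PySem.List.slice cs (some (st.2.2 + 1)) none
  let best := if PySem.Chars.strLt f st.1 then f else st.1
  let b := PySem.List.slice cs none (some (n - 1 - st.2.2))
             ++ PySem.List.slice R none (some (st.2.2 + 1))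
  let best := if PySem.Chars.strLt b best then b else best
  (best, rp, st.2.2 + 1)

def solution_alt (word : String) : String :=
  let cs := word.toList
  let n : Int := cs.length
  let R := cs.reverse                        -- ''.join(reversed(word))
  String.ofList ((cs.foldl (stepB cs R n) (cs, ([], 0))).1)

-- ===== PRECONDITION & SPEC =====
def Spec_solution (word : String) (out : String) : Prop := out = solution_alt word
instance (word : String) (out : String) : Decidable (Spec_solution word out) := by unfold Spec_solution; infer_instance

-- ===== CLAIM (what is proved, stated in full; the proofs are below) =====
def Claim_equal_solution : Prop := ∀ (word : String), Dom_solution word → Spec_solution word (solution word)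

-- ===== LEMMAS AND PROOFS =====

-- common closed form of one loop iteration (j = 0-based position; A uses k = j+1)
def cf (cs mn : List Char) (j : Nat) : List Char :=
  let front := (cs.take (j + 1)).reverse ++ cs.drop (j + 1)
  let mn := if PySem.Chars.strLt front mn then front else mn
  let back := cs.take (cs.length - (j + 1)) ++ (cs.drop (cs.length - (j + 1))).reverse
  if PySem.Chars.strLt back mn then back else mn

lemma stepA_eq (cs mn : List Char) (j : Nat) :
    stepA cs mn ((j : Int) + 1) = cf cs mn j := by
  have e1 : (j : Int) + 1 = ((j + 1 : Nat) : Int) := by push_cast; ring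
  unfold stepA cf
  rw [e1, PySem.List.slice_to_natCast, PySem.List.slice_from_natCast,
      PySem.List.slice_to_neg_natCast _ _ (by omega),
      PySem.List.slice_from_neg_natCast _ _ (by omega),
      PySem.List.slice?_none_none_neg_one, PySem.List.slice?_none_none_neg_one]
  rfl

lemma stepB_eq (pre t : List Char) (c : Char) (mn : List Char) :
    stepB (pre ++ c :: t) (pre ++ c :: t).reverse (((pre ++ c :: t).length : Int))
        (mn, pre.reverse, (pre.length : Int)) c
      = (cf (pre ++ c :: t) mn pre.length, c :: pre.reverse, (pre.length : Int) + 1) := by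
  have hlen : (pre ++ c :: t).length = pre.length + 1 + t.length := by
    simp [List.length_append]; omega
  have htake : (pre ++ c :: t).take (pre.length + 1) = pre ++ [c] := by
    simp [List.take_append]
  have e1 : (pre.length : Int) + 1 = ((pre.length + 1 : Nat) : Int) := by push_cast; ring
  have e2 : (((pre ++ c :: t).length : Int)) - 1 - (pre.length : Int)
      = (((pre ++ c :: t).length - (pre.length + 1) : Nat) : Int) := by
    omega
  unfold stepB cf
  rw [e1, e2, PySem.List.slice_from_natCast, PySem.List.slice_to_natCast,
      PySem.List.slice_to_natCast, List.take_reverse]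
  rw [htake]
  simp

lemma loop_eq (t : List Char) : ∀ (pre mn : List Char),
    (PySem.List.pyRange ((pre.length : Int) + 1) (((pre ++ t).length : Int) + 1)).foldl
        (stepA (pre ++ t)) mn
      = (t.foldl (stepB (pre ++ t) (pre ++ t).reverse ((pre ++ t).length : Int))
          (mn, pre.reverse, (pre.length : Int))).1 := by
  induction t with
  | nil =>
      intro pre mn
      rw [PySem.List.pyRange_one_eq_nil (by simp)]
      simp
  | cons c t ih =>
      intro pre mn
      have hlen : (pre ++ c :: t).length = pre.length + 1 + t.length := by
        simp [List.length_append]; omega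
      rw [PySem.List.pyRange_one_cons (by rw [hlen]; push_cast; omega)]
      simp only [List.foldl_cons]
      rw [stepA_eq _ _ pre.length, stepB_eq]
      have hpre : pre ++ c :: t = (pre ++ [c]) ++ t := by
        simp [List.append_assoc]
      have h1 : ((pre ++ [c]).length : Int) = (pre.length : Int) + 1 := by
        simp [List.length_append]
      have h2 : (pre ++ [c]).reverse = c :: pre.reverse := by simp
      have := ih (pre ++ [c]) (cf (pre ++ c :: t) mn pre.length)
      rw [h1, h2, ← hpre] at this
      exact this

-- ===== VERDICT (by name: the statement is the Claim_ definition above) =====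
theorem solution_spec : Claim_equal_solution := by
  intro word _
  unfold Spec_solution
  have h := loop_eq word.toList [] word.toList
  simp only [List.nil_append, List.length_nil, Nat.cast_zero, List.reverse_nil,
    zero_add] at h
  show String.ofList
      (List.foldl (stepA word.toList) word.toList
        (PySem.List.pyRange 1 ((word.toList.length : Int) + 1)))
    = String.ofList
      (List.foldl (stepB word.toList word.toList.reverse (word.toList.length : Int))
        (word.toList, [], 0) word.toList).1
  rw [h]
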